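-- pv_equiv track=rewrite | github.com/ext2txe/qwsengine | playground/PoC2.py | compact_html
-- ===== SOURCE A (Python) =====
-- def compact_html(text: str, drop_all_blank_lines: bool = True) -> str:
--     lines = text.splitlines()
--     if drop_all_blank_lines:
--         lines = [ln.rstrip() for ln in lines if ln.strip() != ""]
--     else:
--         out = []
--         blank = False
--         for ln in lines:
--             if ln.strip() == "":
--                 if not blank:
--                     out.append("")
--                 blank = True
--             else:
--                 out.append(ln.rstrip())
--                 blank = False
--         lines = out
--     return "\n".join(lines)
-- ===== SOURCE B (Python) =====
-- def compact_html(text: str, drop_all_blank_lines: bool = True) -> str: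
--     # Run-based scan: skip each run of blank lines in one inner loop
--     # (emitting a single "" per run unless dropping), no blank flag needed.
--     lines = text.splitlines()
--     out = []
--     i = 0
--     n = len(lines)
--     while i < n:
--         if lines[i].strip() == "":
--             while i < n and lines[i].strip() == "":
--                 i += 1
--             if not drop_all_blank_lines:
--                 out.append("")
--         else:
--             out.append(lines[i].rstrip())
--             i += 1
--     return "\n".join(out)
-- ===== Notes on version B (the rewrite author's own statement) =====
-- stated objective: alternative
-- what changed: Replaced the per-line scan carrying a boolean flag for whitespace-only lines (and A's separate filter branch for drop mode) by a single run-based scan: an inner loop skips each whole run of whitespace-only lines at once, emitting one empty line per run only when not dropping.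
import Mathlib
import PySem

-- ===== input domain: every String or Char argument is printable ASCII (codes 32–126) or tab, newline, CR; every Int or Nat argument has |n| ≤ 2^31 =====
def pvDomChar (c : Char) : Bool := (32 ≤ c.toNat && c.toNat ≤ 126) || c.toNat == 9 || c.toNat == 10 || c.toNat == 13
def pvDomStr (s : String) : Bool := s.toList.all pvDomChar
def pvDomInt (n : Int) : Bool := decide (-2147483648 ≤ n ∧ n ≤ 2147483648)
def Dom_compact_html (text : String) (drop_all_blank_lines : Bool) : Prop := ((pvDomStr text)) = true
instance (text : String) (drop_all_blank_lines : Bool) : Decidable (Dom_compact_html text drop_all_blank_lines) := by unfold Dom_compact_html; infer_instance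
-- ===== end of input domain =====

-- B replaces A's per-line flag-carrying scan (and its separate drop-mode filter branch)
-- by a single run-based scan that skips each run of whitespace-only lines at once; same output.


-- ===== PORT A =====
-- A's else-branch loop: state is (out, blank), appended/updated exactly as in the Python.
def compactA_step (st : List String × Bool) (ln : String) : List String × Bool :=
  if PySem.Str.strip ln = "" then
    (if !st.2 then st.1 ++ [""] else st.1, true)
  else
    (st.1 ++ [PySem.Str.rstrip ln], false)

def compact_html (text : String) (drop_all_blank_lines : Bool) : String :=
  let lines := PySem.Str.splitlines text
  let lines :=
    if drop_all_blank_lines then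
      (lines.filter (fun ln => PySem.Str.strip ln ≠ "")).map PySem.Str.rstrip
    else
      (lines.foldl compactA_step ([], false)).1
  PySem.Str.join "\n" lines

-- ===== PORT B =====
def pvBlank (ln : String) : Bool := PySem.Str.strip ln = ""

-- B's outer while loop over the line list; the inner `while … blank` is the dropWhile.
def compactB_go (drop : Bool) : List String → List String
  | [] => []
  | ln :: ls =>
    if pvBlank ln then
      (if !drop then [""] else []) ++ compactB_go drop (ls.dropWhile pvBlank)
    else
      PySem.Str.rstrip ln :: compactB_go drop ls
termination_by ls => ls.length
decreasing_by
  · exact Nat.lt_succ_of_le (List.length_dropWhile_le _ _)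
  · simp

def compact_html_alt (text : String) (drop_all_blank_lines : Bool) : String :=
  PySem.Str.join "\n" (compactB_go drop_all_blank_lines (PySem.Str.splitlines text))

-- ===== PRECONDITION & SPEC =====
def Spec_compact_html (text : String) (drop_all_blank_lines : Bool) (out : String) : Prop := out = compact_html_alt text drop_all_blank_lines
instance (text : String) (drop_all_blank_lines : Bool) (out : String) : Decidable (Spec_compact_html text drop_all_blank_lines out) := by unfold Spec_compact_html; infer_instance

-- ===== CLAIM (what is proved, stated in full; the proofs are below) =====
def Claim_equal_compact_html : Prop := ∀ (text : String) (drop_all_blank_lines : Bool), Dom_compact_html text drop_all_blank_lines → Spec_compact_html text drop_all_blank_lines (compact_html text drop_all_blank_lines)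

-- ===== LEMMAS AND PROOFS =====

-- drop mode: B's run-skipping scan equals A's filter-then-rstrip;
-- the second conjunct handles a list whose leading blank run was consumed.
theorem goB_drop_eq (ls : List String) :
    compactB_go true ls = (ls.filter (fun ln => PySem.Str.strip ln ≠ "")).map PySem.Str.rstrip ∧
    compactB_go true (ls.dropWhile pvBlank) = (ls.filter (fun ln => PySem.Str.strip ln ≠ "")).map PySem.Str.rstrip := by
  induction ls with
  | nil => simp [compactB_go]
  | cons ln ls ih =>
    by_cases h : PySem.Str.strip ln = ""
    · have hb : pvBlank ln = true := by simp [pvBlank, h]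
      constructor
      · rw [compactB_go]
        simp [hb, h, ih.2]
      · rw [List.dropWhile_cons_of_pos hb]
        simp [h, ih.2]
    · have hb : pvBlank ln = false := by simp [pvBlank, h]
      have e1 : compactB_go true (ln :: ls) = PySem.Str.rstrip ln :: compactB_go true ls := by
        rw [compactB_go]; simp [hb]
      constructor
      · rw [e1]; simp [h, ih.1]
      · rw [List.dropWhile_cons_of_neg (by simp [hb]), e1]
        simp [h, ih.1]

-- keep mode: A's foldl with the blank flag, run against any accumulator, equals
-- the accumulator followed by B's scan (flag=true: the current blank run was already emitted).
theorem foldA_eq (ls : List String) :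
    (∀ out : List String, (ls.foldl compactA_step (out, false)).1 = out ++ compactB_go false ls) ∧
    (∀ out : List String, (ls.foldl compactA_step (out, true)).1 = out ++ compactB_go false (ls.dropWhile pvBlank)) := by
  induction ls with
  | nil => simp [compactB_go]
  | cons ln ls ih =>
    by_cases h : PySem.Str.strip ln = ""
    · have hb : pvBlank ln = true := by simp [pvBlank, h]
      constructor
      · intro out
        have : compactA_step (out, false) ln = (out ++ [""], true) := by
          simp [compactA_step, h]
        rw [List.foldl_cons, this, ih.2]
        rw [compactB_go]
        simp [hb]
      · intro out
        have : compactA_step (out, true) ln = (out, true) := by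
          simp [compactA_step, h]
        rw [List.foldl_cons, this, ih.2, List.dropWhile_cons_of_pos hb]
    · have hb : pvBlank ln = false := by simp [pvBlank, h]
      have e1 : compactB_go false (ln :: ls) = PySem.Str.rstrip ln :: compactB_go false ls := by
        rw [compactB_go]; simp [hb]
      constructor
      · intro out
        rw [List.foldl_cons]
        show (ls.foldl compactA_step (compactA_step (out, false) ln)).1 = _
        simp only [compactA_step, h, if_false]
        rw [ih.1, e1]; simp
      · intro out
        rw [List.foldl_cons]
        show (ls.foldl compactA_step (compactA_step (out, true) ln)).1 = _
        simp only [compactA_step, h, if_false]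
        rw [ih.1, List.dropWhile_cons_of_neg (by simp [hb]), e1]
        simp

-- ===== VERDICT (by name: the statement is the Claim_ definition above) =====
theorem compact_html_spec : Claim_equal_compact_html := by
  intro text drop _
  unfold Spec_compact_html compact_html compact_html_alt
  cases drop with
  | true => simp [(goB_drop_eq (PySem.Str.splitlines text)).1]
  | false =>
    simp only [Bool.false_eq_true, if_false]
    rw [(foldA_eq (PySem.Str.splitlines text)).1 []]
    simp
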